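-- pv_equiv track=rewrite | github.com/allenai/PathNet | pathnet/pathfinder/util.py | find_sentidx
-- ===== SOURCE A (Python) =====
-- from typing import List, Dict, Any, Tuple
--
-- def find_sentidx(doctoks: List[List[str]],
--                  word_idx: int) -> int:
--     """
--     find the sentidx given word idx
--     :param doctoks:
--     :param word_idx:
--     :return:
--     """
--     count = 0
--     for idx, doc in enumerate(doctoks):
--         count += len(doc)
--         if word_idx < count:
--             return idx
--     return len(doctoks) - 1
-- ===== SOURCE B (Python) =====
-- def find_sentidx(doctoks, word_idx):
--     # prefix sums of sentence lengths, then binary search for the first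
--     # cumulative count strictly greater than word_idx
--     prefix = []
--     total = 0
--     for doc in doctoks:
--         total += len(doc)
--         prefix.append(total)
--     lo, hi = 0, len(prefix)
--     while lo < hi:
--         mid = (lo + hi) // 2
--         if prefix[mid] <= word_idx:
--             lo = mid + 1
--         else:
--             hi = mid
--     return lo if lo < len(doctoks) else len(doctoks) - 1
-- ===== Notes on version B (the rewrite author's own statement) =====
-- stated objective: alternative
-- what changed: Replaces the single linear scan with a prefix-sum array plus binary search (bisect_right shape) for the first cumulative length exceeding word_idx.
import Mathlib
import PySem

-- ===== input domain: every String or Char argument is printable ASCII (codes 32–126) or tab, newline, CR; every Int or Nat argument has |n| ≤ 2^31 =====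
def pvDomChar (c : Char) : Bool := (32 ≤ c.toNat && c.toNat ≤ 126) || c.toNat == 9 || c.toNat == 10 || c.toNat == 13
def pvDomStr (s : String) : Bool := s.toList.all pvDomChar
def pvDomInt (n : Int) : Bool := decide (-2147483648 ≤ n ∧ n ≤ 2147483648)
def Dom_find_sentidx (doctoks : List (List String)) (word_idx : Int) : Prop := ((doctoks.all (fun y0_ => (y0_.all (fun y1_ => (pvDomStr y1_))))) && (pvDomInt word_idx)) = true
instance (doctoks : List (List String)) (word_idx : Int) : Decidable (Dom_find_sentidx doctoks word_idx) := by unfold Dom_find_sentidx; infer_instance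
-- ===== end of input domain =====

-- B replaces A's linear scan with a prefix-sum list plus binary search; return value only, no speed claim.

-- ===== PORT A =====
-- A's loop: enumerate doctoks, accumulate count, return idx when word_idx < count.
def find_sentidx.go (word_idx : Int) : List (List String) → Nat → Int → Option Int
  | [], _, _ => none
  | doc :: rest, idx, count =>
    let c := count + (doc.length : Int)
    if word_idx < c then some (idx : Int) else find_sentidx.go word_idx rest (idx + 1) c

def find_sentidx (doctoks : List (List String)) (word_idx : Int) : Int :=
  (find_sentidx.go word_idx doctoks 0 0).getD ((doctoks.length : Int) - 1)

-- ===== PORT B =====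
-- prefix sums of the sentence lengths (Source B's first loop)
def pvPrefix : List (List String) → Int → List Int
  | [], _ => []
  | doc :: rest, total =>
    let t := total + (doc.length : Int)
    t :: pvPrefix rest t

-- Source B's while-loop binary search: first index with prefix[mid] > word_idx
def pvBsearch (P : List Int) (w : Int) (lo hi : Nat) : Nat :=
  if h : lo < hi then
    let mid := (lo + hi) / 2
    if P.getD mid 0 ≤ w then pvBsearch P w (mid + 1) hi else pvBsearch P w lo mid
  else lo
termination_by hi - lo
decreasing_by
  · omega
  · omega

def find_sentidx_alt (doctoks : List (List String)) (word_idx : Int) : Int :=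
  let pre := pvPrefix doctoks 0
  let lo := pvBsearch pre word_idx 0 pre.length
  if lo < doctoks.length then (lo : Int) else (doctoks.length : Int) - 1

-- ===== PRECONDITION & SPEC =====
def Spec_find_sentidx (doctoks : List (List String)) (word_idx : Int) (out : Int) : Prop := out = find_sentidx_alt doctoks word_idx
instance (doctoks : List (List String)) (word_idx : Int) (out : Int) : Decidable (Spec_find_sentidx doctoks word_idx out) := by unfold Spec_find_sentidx; infer_instance

-- ===== CLAIM (what is proved, stated in full; the proofs are below) =====
def Claim_equal_find_sentidx : Prop := ∀ (doctoks : List (List String)) (word_idx : Int), Dom_find_sentidx doctoks word_idx → Spec_find_sentidx doctoks word_idx (find_sentidx doctoks word_idx)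

-- ===== LEMMAS AND PROOFS =====

-- first index of P whose value exceeds w (specification device for both ports)
def firstGt (w : Int) : List Int → Option Nat
  | [] => none
  | c :: rest => if w < c then some 0 else (firstGt w rest).map (· + 1)

theorem pvPrefix_length (docs : List (List String)) (t : Int) :
    (pvPrefix docs t).length = docs.length := by
  induction docs generalizing t with
  | nil => rfl
  | cons d rest ih => simp [pvPrefix, ih]

theorem pvPrefix_lb (docs : List (List String)) (t : Int) (k : Nat)
    (hk : k < (pvPrefix docs t).length) : t ≤ (pvPrefix docs t).getD k 0 := by
  induction docs generalizing t k with
  | nil => simp [pvPrefix] at hk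
  | cons d rest ih =>
    cases k with
    | zero => simp [pvPrefix]
    | succ k =>
      simp only [pvPrefix, List.length_cons, List.getD_cons_succ] at hk ⊢
      have := ih (t + (d.length : Int)) k (by omega)
      have : (0:Int) ≤ (d.length : Int) := by positivity
      omega

theorem pvPrefix_mono (docs : List (List String)) (t : Int) (i j : Nat)
    (hij : i ≤ j) (hj : j < (pvPrefix docs t).length) :
    (pvPrefix docs t).getD i 0 ≤ (pvPrefix docs t).getD j 0 := by
  induction docs generalizing t i j with
  | nil => simp [pvPrefix] at hj
  | cons d rest ih =>
    cases i with
    | zero =>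
      cases j with
      | zero => exact le_refl _
      | succ j =>
        simp only [pvPrefix, List.length_cons, List.getD_cons_zero, List.getD_cons_succ] at hj ⊢
        exact pvPrefix_lb rest (t + (d.length : Int)) j (by omega)
    | succ i =>
      cases j with
      | zero => omega
      | succ j =>
        simp only [pvPrefix, List.length_cons, List.getD_cons_succ] at hj ⊢
        exact ih (t + (d.length : Int)) i j (by omega) (by omega)

-- A's loop computes firstGt over the prefix sums
theorem go_eq_firstGt (w : Int) (docs : List (List String)) (idx : Nat) (count : Int) :
    find_sentidx.go w docs idx count
      = (firstGt w (pvPrefix docs count)).map (fun j => ((idx + j : Nat) : Int)) := by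
  induction docs generalizing idx count with
  | nil => simp [find_sentidx.go, pvPrefix, firstGt]
  | cons d rest ih =>
    simp only [find_sentidx.go, pvPrefix, firstGt]
    by_cases h : w < count + (d.length : Int)
    · simp [h]
    · simp only [h, if_false]
      rw [ih]
      cases firstGt w (pvPrefix rest (count + (d.length : Int))) with
      | none => simp
      | some j => simp; omega

-- characterisation of firstGt
theorem firstGt_none (w : Int) (P : List Int) (h : firstGt w P = none) :
    ∀ k, k < P.length → P.getD k 0 ≤ w := by
  induction P with
  | nil => intro k hk; simp at hk
  | cons c rest ih =>
    simp only [firstGt] at h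
    by_cases hc : w < c
    · simp [hc] at h
    · simp only [hc, Option.map_eq_none_iff, if_false] at h
      intro k hk
      cases k with
      | zero => simpa using not_lt.mp hc
      | succ k =>
        simp only [List.getD_cons_succ]
        exact ih (by simpa using h) k (by simpa using Nat.lt_of_succ_lt_succ hk)

theorem firstGt_some (w : Int) (P : List Int) (j : Nat) (h : firstGt w P = some j) :
    j < P.length ∧ w < P.getD j 0 ∧ ∀ k, k < j → P.getD k 0 ≤ w := by
  induction P generalizing j with
  | nil => simp [firstGt] at h
  | cons c rest ih =>
    simp only [firstGt] at h
    by_cases hc : w < c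
    · simp [hc] at h
      subst h
      exact ⟨by simp, by simpa using hc, fun k hk => by omega⟩
    · simp only [hc, if_false, Option.map_eq_some_iff] at h
      obtain ⟨j', hj', rfl⟩ := h
      obtain ⟨h1, h2, h3⟩ := ih j' hj'
      refine ⟨by simpa using Nat.succ_lt_succ h1, by simpa using h2, ?_⟩
      intro k hk
      cases k with
      | zero => simpa using not_lt.mp hc
      | succ k => exact h3 k (Nat.lt_of_succ_lt_succ hk)

-- crossing-point predicate
def Cross (P : List Int) (w : Int) (r : Nat) : Prop :=
  r ≤ P.length ∧ (∀ k, k < r → P.getD k 0 ≤ w) ∧ (∀ k, r ≤ k → k < P.length → w < P.getD k 0)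

theorem cross_unique (P : List Int) (w : Int) (r r' : Nat)
    (h : Cross P w r) (h' : Cross P w r') : r = r' := by
  obtain ⟨hr, hlo, hhi⟩ := h
  obtain ⟨hr', hlo', hhi'⟩ := h'
  by_contra hne
  rcases Nat.lt_or_ge r r' with hlt | hge
  · have := hhi r (le_refl _) (by omega)
    have := hlo' r hlt
    omega
  · have hlt : r' < r := by omega
    have := hhi' r' (le_refl _) (by omega)
    have := hlo r' hlt
    omega

-- the binary search reaches the crossing point (needs monotone P)
theorem pvBsearch_cross (P : List Int) (w : Int)
    (mono : ∀ i j, i ≤ j → j < P.length → P.getD i 0 ≤ P.getD j 0) :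
    ∀ n lo hi, hi - lo ≤ n → lo ≤ hi → hi ≤ P.length →
      (∀ k, k < lo → P.getD k 0 ≤ w) → (∀ k, hi ≤ k → k < P.length → w < P.getD k 0) →
      Cross P w (pvBsearch P w lo hi) := by
  intro n
  induction n with
  | zero =>
    intro lo hi hn hle hhi hbelow habove
    rw [pvBsearch]
    have h : ¬ lo < hi := by omega
    rw [dif_neg h]
    exact ⟨by omega, hbelow, fun k hk1 hk2 => habove k (by omega) hk2⟩
  | succ n IH =>
    intro lo hi hn hle hhi hbelow habove
    rw [pvBsearch]
    by_cases h : lo < hi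
    · simp only [h, dif_pos]
      set mid := (lo + hi) / 2 with hmid
      have hm1 : lo ≤ mid := by omega
      have hm2 : mid < hi := by omega
      by_cases hc : P.getD mid 0 ≤ w
      · simp only [hc, if_pos]
        exact IH (mid + 1) hi (by omega) (by omega) hhi
          (fun k hk => le_trans (mono k mid (by omega) (by omega)) hc) habove
      · simp only [hc, if_false]
        exact IH lo mid (by omega) (by omega) (by omega) hbelow
          (fun k hk1 hk2 => lt_of_lt_of_le (not_le.mp hc) (mono mid k hk1 hk2))
    · rw [dif_neg h]
      exact ⟨by omega, hbelow, fun k hk1 hk2 => habove k (by omega) hk2⟩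

-- ===== VERDICT (by name: the statement is the Claim_ definition above) =====
theorem find_sentidx_spec : Claim_equal_find_sentidx := by
  intro doctoks word_idx _
  unfold Spec_find_sentidx find_sentidx find_sentidx_alt
  set P := pvPrefix doctoks 0 with hP
  have hlen : P.length = doctoks.length := pvPrefix_length doctoks 0
  have mono : ∀ i j, i ≤ j → j < P.length → P.getD i 0 ≤ P.getD j 0 :=
    fun i j => pvPrefix_mono doctoks 0 i j
  have hbs : Cross P word_idx (pvBsearch P word_idx 0 P.length) :=
    pvBsearch_cross P word_idx mono P.length 0 P.length (by omega) (by omega) (le_refl _)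
      (by omega) (fun k hk1 hk2 => by omega)
  rw [go_eq_firstGt]
  cases hfg : firstGt word_idx P with
  | none =>
    have hcross : Cross P word_idx P.length :=
      ⟨le_refl _, firstGt_none _ _ hfg, fun k hk1 hk2 => by omega⟩
    have := cross_unique P word_idx _ _ hbs hcross
    simp only [this, Option.map_none, Option.getD_none]
    simp [hlen]
  | some j =>
    obtain ⟨h1, h2, h3⟩ := firstGt_some word_idx P j hfg
    have hcross : Cross P word_idx j :=
      ⟨le_of_lt h1, h3, fun k hk1 hk2 =>
        lt_of_lt_of_le h2 (mono j k hk1 hk2)⟩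
    have := cross_unique P word_idx _ _ hbs hcross
    simp only [this, Option.map_some, Option.getD_some]
    rw [hlen] at h1
    simp [h1]
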